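-- pv_equiv track=rewrite | github.com/Moushmi-DM-20/DSA-ProblemSolving-Java | Python Interview Questions and Answers/037. Palindrome Date.py | splitDate
-- ===== SOURCE A (Python) =====
-- def splitDate(date):
--     resDate = []
--     num = ""
--     for c in date:
--         if c=='/':
--             resDate.append(num)
--             num=""
--         elif c!=" ":
--             num+=c
--     resDate.append(num)
--     return resDate
-- ===== SOURCE B (Python) =====
-- def splitDate(date):
--     return date.replace(" ", "").split("/")
-- ===== Notes on version B (the rewrite author's own statement) =====
-- stated objective: simpler
-- what changed: Replaces the manual character-by-character accumulation loop with two library passes: strip spaces via str.replace, then split on the slash separator via str.split.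
import Mathlib
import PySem

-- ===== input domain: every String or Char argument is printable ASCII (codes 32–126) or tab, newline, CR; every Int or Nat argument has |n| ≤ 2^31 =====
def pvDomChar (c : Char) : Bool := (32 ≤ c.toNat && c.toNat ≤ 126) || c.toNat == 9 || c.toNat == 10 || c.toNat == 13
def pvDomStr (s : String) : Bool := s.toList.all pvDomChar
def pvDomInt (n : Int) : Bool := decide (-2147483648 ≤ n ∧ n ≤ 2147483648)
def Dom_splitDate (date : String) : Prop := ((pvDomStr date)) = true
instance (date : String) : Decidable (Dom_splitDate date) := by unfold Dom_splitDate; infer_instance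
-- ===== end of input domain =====

-- B replaces A's manual character-accumulation loop by two library passes (strip spaces with replace, then split on '/'); same cost, simpler.

-- ===== PORT A =====
-- A's loop over the characters of `date`, keeping (resDate, num); Python strings are
-- represented as List Char during the loop (PySem convention) and joined back at the end.
def splitDate (date : String) : List String :=
  let step : List (List Char) × List Char → Char → List (List Char) × List Char :=
    fun st c =>
      if c == '/' then (st.1 ++ [st.2], [])
      else if c != ' ' then (st.1, st.2 ++ [c])
      else st
  let s := date.toList.foldl step ([], [])
  (s.1 ++ [s.2]).map String.ofList

-- ===== PORT B =====
-- B: date.replace(" ", "").split("/"); split? returns some here since "/" ≠ "".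
def splitDate_alt (date : String) : List String :=
  (PySem.Str.split? (PySem.Str.replace date " " "") "/").getD []

-- ===== PRECONDITION & SPEC =====
def Spec_splitDate (date : String) (out : List String) : Prop := out = splitDate_alt date
instance (date : String) (out : List String) : Decidable (Spec_splitDate date out) := by unfold Spec_splitDate; infer_instance

-- ===== CLAIM (what is proved, stated in full; the proofs are below) =====
def Claim_equal_splitDate : Prop := ∀ (date : String), Dom_splitDate date → Spec_splitDate date (splitDate date)

-- ===== LEMMAS AND PROOFS =====

-- split on a single character, structurally (always returns a nonempty list)
def splitCh (c0 : Char) : List Char → List (List Char)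
  | [] => [[]]
  | c :: t =>
    if c == c0 then [] :: splitCh c0 t
    else match splitCh c0 t with
      | [] => [[c]]
      | h :: r => (c :: h) :: r

theorem splitCh_ne_nil (c0 : Char) (l : List Char) : splitCh c0 l ≠ [] := by
  cases l with
  | nil => simp [splitCh]
  | cons c t =>
    simp only [splitCh]
    split
    · simp
    · split <;> simp

-- replace.go with old = [' '], new = [] filters out the spaces
theorem replace_go_space (l : List Char) : ∀ (fuel : Nat) (acc : List Char),
    l.length ≤ fuel →
    PySem.Chars.replace.go [' '] [] fuel l acc = acc.reverse ++ l.filter (fun c => c != ' ') := by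
  induction l with
  | nil =>
    intro fuel acc _
    cases fuel <;> simp [PySem.Chars.replace.go]
  | cons c t ih =>
    intro fuel acc h
    cases fuel with
    | zero => simp at h
    | succ f =>
      simp only [PySem.Chars.replace.go, List.isPrefixOf, List.filter]
      by_cases hc : c = ' '
      · subst hc
        simp only [beq_self_eq_true, Bool.true_and, if_pos]
        simp only [List.length_cons, List.drop_succ_cons, List.length_nil, List.drop_zero, List.reverse_nil,
          List.nil_append]
        rw [ih f acc (by simpa using h)]
        simp
      · have hb : ((' ' == c) && true) = false := by
          simp [beq_eq_false_iff_ne, Ne.symm hc]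
        simp only [hb]
        simp only [Bool.false_eq_true, if_false]
        rw [ih f (c :: acc) (by simpa using h)]
        have h2 : (c != ' ') = true := by simp [bne_iff_ne, hc]
        simp [h2]

theorem replace_space (cs : List Char) :
    PySem.Chars.replace cs [' '] [] = cs.filter (fun c => c != ' ') := by
  simp only [PySem.Chars.replace, List.isEmpty]
  exact replace_go_space cs cs.length [] (le_refl _)

-- splitOn.go with sep = ['/'] computes splitCh, shifted by the accumulators
theorem splitOn_go_slash (l : List Char) : ∀ (fuel : Nat) (cur : List Char) (acc : List (List Char)),
    l.length < fuel →
    PySem.Chars.splitOn.go ['/'] fuel l cur acc =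
      acc.reverse ++
        (match splitCh '/' l with
          | [] => []
          | h :: r => (cur.reverse ++ h) :: r) := by
  induction l with
  | nil =>
    intro fuel cur acc h
    cases fuel with
    | zero => omega
    | succ f => simp [PySem.Chars.splitOn.go, splitCh]
  | cons c t ih =>
    intro fuel cur acc h
    cases fuel with
    | zero => omega
    | succ f =>
      simp only [PySem.Chars.splitOn.go, List.isPrefixOf]
      by_cases hc : c = '/'
      · subst hc
        simp only [beq_self_eq_true, Bool.true_and, if_pos]
        simp only [List.length_cons, List.drop_succ_cons, List.length_nil, List.drop_zero]
        rw [ih f [] (cur.reverse :: acc) (by simpa using h)]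
        rcases hs : splitCh '/' t with _ | ⟨sh, sr⟩
        · exact absurd hs (splitCh_ne_nil _ _)
        · simp [splitCh, hs]
      · have hb : (('/' == c) && true) = false := by
          simp [beq_eq_false_iff_ne, Ne.symm hc]
        simp only [hb]
        simp only [Bool.false_eq_true, if_false]
        rw [ih f (c :: cur) acc (by simpa using h)]
        rcases hs : splitCh '/' t with _ | ⟨sh, sr⟩
        · exact absurd hs (splitCh_ne_nil _ _)
        · simp [splitCh, hc, hs]

theorem splitOn_slash (cs : List Char) :
    PySem.Chars.splitOn cs ['/'] = splitCh '/' cs := by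
  rw [PySem.Chars.splitOn, splitOn_go_slash cs (cs.length + 1) [] [] (by omega)]
  rcases hs : splitCh '/' cs with _ | ⟨h, r⟩
  · exact absurd hs (splitCh_ne_nil _ _)
  · simp

-- A's fold computes splitCh of the space-filtered list, shifted by (res, cur)
theorem foldA (l : List Char) : ∀ (res : List (List Char)) (cur : List Char),
    (let s := l.foldl (fun st c =>
        if c == '/' then (st.1 ++ [st.2], ([] : List Char))
        else if c != ' ' then (st.1, st.2 ++ [c])
        else st) (res, cur);
      s.1 ++ [s.2]) =
    res ++
      (match splitCh '/' (l.filter (fun c => c != ' ')) with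
        | [] => []
        | h :: r => (cur ++ h) :: r) := by
  induction l with
  | nil => intro res cur; simp [splitCh]
  | cons c t ih =>
    intro res cur
    by_cases hc : c = '/'
    · subst hc
      simp only [List.foldl_cons, beq_self_eq_true, if_pos, List.filter]
      rw [ih (res ++ [cur]) []]
      rcases hs : splitCh '/' (t.filter (fun c => c != ' ')) with _ | ⟨sh, sr⟩
      · exact absurd hs (splitCh_ne_nil _ _)
      · simp [splitCh, hs]
    · by_cases hsp : c = ' '
      · subst hsp
        simp only [List.foldl_cons, List.filter]
        have : ((' ' : Char) == '/') = false := by decide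
        simp only [this, Bool.false_eq_true, if_false, bne_self_eq_false,
          Bool.false_eq_true, if_false]
        exact ih res cur
      · simp only [List.foldl_cons, List.filter]
        have h1 : (c == '/') = false := by simp [beq_eq_false_iff_ne, hc]
        have h2 : (c != ' ') = true := by simp [bne_iff_ne, hsp]
        simp only [h1, Bool.false_eq_true, if_false, h2, if_pos]
        rw [ih res (cur ++ [c])]
        rcases hs : splitCh '/' (t.filter (fun c => c != ' ')) with _ | ⟨sh, sr⟩
        · exact absurd hs (splitCh_ne_nil _ _)
        · simp [splitCh, hc, hs]

-- ===== VERDICT (by name: the statement is the Claim_ definition above) =====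
theorem splitDate_spec : Claim_equal_splitDate := by
  intro date _
  simp only [Spec_splitDate, splitDate, splitDate_alt]
  have hB : (PySem.Str.split? (PySem.Str.replace date " " "") "/").getD [] =
      (splitCh '/' (date.toList.filter (fun c => c != ' '))).map String.ofList := by
    rw [PySem.Str.split?]
    have ht : (PySem.Str.replace date " " "").toList =
        date.toList.filter (fun c => c != ' ') := by
      rw [PySem.Str.toList_replace]
      simpa using replace_space date.toList
    rw [ht]
    show (Option.map _ (PySem.Chars.split? _ ('/'.toString).toList)).getD [] = _
    have hsep : ('/'.toString).toList = ['/'] := by decide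
    rw [hsep, PySem.Chars.split?]
    simp [splitOn_slash]
  rw [hB]
  have hA := foldA date.toList [] []
  simp only at hA
  rw [hA]
  rcases hs : splitCh '/' (date.toList.filter (fun c => c != ' ')) with _ | ⟨h, r⟩
  · exact absurd hs (splitCh_ne_nil _ _)
  · simp
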